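-- pv_equiv track=rewrite | github.com/varunthej-8630/custos-digital-perimeter--p1 | tracker.py | _check_pacing
-- ===== SOURCE A (Python) =====
-- def _check_pacing(t):
--     """
--     Pacing = person moving back and forth in the same area.
--     Detects by counting direction reversals in recent history.
--     """
--     hist = t['position_history']
--     if len(hist) < 10:
--         return False
--
--     reversals = 0
--     prev_dx   = 0
--     for i in range(1, len(hist)):
--         dx = hist[i][0] - hist[i-1][0]
--         if prev_dx != 0:
--             # Direction reversed on X axis
--             if (dx > 3 and prev_dx < -3) or (dx < -3 and prev_dx > 3):
--                 reversals += 1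
--         if abs(dx) > 3:
--             prev_dx = dx
--
--     # 3+ reversals in recent history = pacing
--     return reversals >= 3
-- ===== SOURCE B (Python) =====
-- def _check_pacing(t):
--     """Pairwise/zip formulation: keep the significant x-steps themselves,
--     then count adjacent pairs whose product is negative (= a reversal)."""
--     hist = t['position_history']
--     if len(hist) < 10:
--         return False
--     sig = [b[0] - a[0] for a, b in zip(hist, hist[1:]) if abs(b[0] - a[0]) > 3]
--     return sum(1 for d1, d2 in zip(sig, sig[1:]) if d1 * d2 < 0) >= 3
-- ===== Notes on version B (the rewrite author's own statement) =====
-- stated objective: simpler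
-- what changed: Replaced the index-driven loop with stateful prev_dx/reversal accumulators by a pairwise zip comprehension keeping the significant x-steps, followed by counting adjacent pairs with a negative product (opposite signs).
import Mathlib
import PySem

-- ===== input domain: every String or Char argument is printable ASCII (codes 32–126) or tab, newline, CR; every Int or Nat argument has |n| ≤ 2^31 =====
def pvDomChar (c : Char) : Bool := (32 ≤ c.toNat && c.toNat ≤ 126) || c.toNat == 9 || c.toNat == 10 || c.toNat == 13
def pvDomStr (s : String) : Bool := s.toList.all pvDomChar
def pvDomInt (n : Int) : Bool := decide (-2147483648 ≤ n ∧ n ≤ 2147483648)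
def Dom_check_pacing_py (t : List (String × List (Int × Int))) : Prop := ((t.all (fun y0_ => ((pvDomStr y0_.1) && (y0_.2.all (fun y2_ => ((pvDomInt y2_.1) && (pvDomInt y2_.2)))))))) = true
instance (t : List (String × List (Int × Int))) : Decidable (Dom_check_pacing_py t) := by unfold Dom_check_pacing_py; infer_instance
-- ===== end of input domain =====

-- B replaces A's index-driven stateful loop (prev_dx / reversals accumulators) by a
-- pairwise zip comprehension keeping the significant x-steps, then counting adjacent
-- pairs with a negative product (simpler).

-- ===== PORT A =====
-- literal transliteration of A: running (reversals, prev_dx) state over range(1, len(hist))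
def check_pacing_py (t : List (String × List (Int × Int))) : Bool :=
  match (PySem.Dict.mk t).get? "position_history" with
  | none => false   -- Python raises KeyError here; excluded by Pre_
  | some hist =>
    if hist.length < 10 then false
    else
      let st := (PySem.List.pyRange 1 (hist.length : Int) 1).foldl
        (fun (st : Int × Int) i =>
          let dx := (PySem.List.pyGetD hist i ((0 : Int), (0 : Int))).1
                    - (PySem.List.pyGetD hist (i - 1) ((0 : Int), (0 : Int))).1
          let rev := if st.2 ≠ 0 then
              (if (dx > 3 ∧ st.2 < -3) ∨ (dx < -3 ∧ st.2 > 3) then st.1 + 1 else st.1)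
            else st.1
          let p := if |dx| > 3 then dx else st.2
          (rev, p)) ((0 : Int), (0 : Int))
      decide (st.1 ≥ 3)

-- ===== PORT B =====
-- literal transliteration of B: zip comprehension over consecutive pairs, then a
-- negative-product count over zip(sig, sig[1:])
def check_pacing_py_alt (t : List (String × List (Int × Int))) : Bool :=
  match (PySem.Dict.mk t).get? "position_history" with
  | none => false   -- Python raises KeyError here; excluded by Pre_
  | some hist =>
    if hist.length < 10 then false
    else
      let sig := ((hist.zip (hist.drop 1)).filter
          (fun p => decide (|p.2.1 - p.1.1| > 3))).map (fun p => p.2.1 - p.1.1)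
      let count := ((sig.zip (sig.drop 1)).filter (fun q => decide (q.1 * q.2 < 0))).length
      decide (count ≥ 3)

-- ===== PRECONDITION & SPEC =====
-- A raises KeyError when the dict has no 'position_history' key; Pre_ requires the key.
def Pre_check_pacing_py (t : List (String × List (Int × Int))) : Prop :=
  ((PySem.Dict.mk t).get? "position_history").isSome = true
instance (t : List (String × List (Int × Int))) : Decidable (Pre_check_pacing_py t) := by
  unfold Pre_check_pacing_py; infer_instance
def pvWitness_check_pacing_py : (List (String × List (Int × Int))) := [("position_history", [])]
def Spec_check_pacing_py (t : List (String × List (Int × Int))) (out : Bool) : Prop := out = check_pacing_py_alt t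
instance (t : List (String × List (Int × Int))) (out : Bool) : Decidable (Spec_check_pacing_py t out) := by unfold Spec_check_pacing_py; infer_instance

-- ===== CLAIM (what is proved, stated in full; the proofs are below) =====
def Claim_equal_check_pacing_py : Prop := ∀ (t : List (String × List (Int × Int))), Dom_check_pacing_py t → Pre_check_pacing_py t → Spec_check_pacing_py t (check_pacing_py t)

-- ===== LEMMAS AND PROOFS =====

-- the list of x-differences between consecutive history entries
def pvDxs (hist : List (Int × Int)) : List Int :=
  (hist.zip (hist.drop 1)).map (fun p => p.2.1 - p.1.1)

-- number of adjacent pairs with a negative product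
def pvNegCount : List Int → Int
  | a :: b :: r => (if a * b < 0 then 1 else 0) + pvNegCount (b :: r)
  | _ => 0

-- A's loop step
def pvStepA (st : Int × Int) (dx : Int) : Int × Int :=
  let rev := if st.2 ≠ 0 then
      (if (dx > 3 ∧ st.2 < -3) ∨ (dx < -3 ∧ st.2 > 3) then st.1 + 1 else st.1)
    else st.1
  let p := if |dx| > 3 then dx else st.2
  (rev, p)

-- index loop over range(1, len) computing hist[i]-hist[i-1] = fold over pvDxs
theorem pv_bridge {β : Type} (hist : List (Int × Int)) (g : β → Int → β) (init : β)
    (n : Nat) (hn : n ≤ hist.length) :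
    (PySem.List.pyRange 1 (n : Int) 1).foldl
      (fun st i => g st ((PySem.List.pyGetD hist i ((0 : Int), (0 : Int))).1
                    - (PySem.List.pyGetD hist (i - 1) ((0 : Int), (0 : Int))).1)) init
    = ((pvDxs hist).take (n - 1)).foldl g init := by
  induction n with
  | zero => simp [PySem.List.pyRange_one_eq_nil]
  | succ m ih =>
    rcases Nat.eq_zero_or_pos m with hm | hm
    · subst hm
      rw [PySem.List.pyRange_one_eq_nil (by norm_num)]
      simp
    · have hmle : m ≤ hist.length := Nat.le_of_succ_le hn
      have hlen : (pvDxs hist).length = hist.length - 1 := by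
        simp [pvDxs, List.length_zip]
      have hidx : m - 1 < (pvDxs hist).length := by omega
      have hsplit : PySem.List.pyRange 1 ((m + 1 : Nat) : Int) 1
          = PySem.List.pyRange 1 (m : Int) 1 ++ [(m : Int)] := by
        have := PySem.List.pyRange_one_succ_right (a := 1) (b := (m : Int)) (by exact_mod_cast hm)
        push_cast
        exact this
      rw [hsplit, List.foldl_append, ih hmle]
      have htake : (pvDxs hist).take ((m + 1) - 1)
          = (pvDxs hist).take (m - 1) ++ [(pvDxs hist)[m - 1]] := by
        have : (m + 1) - 1 = (m - 1) + 1 := by omega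
        rw [this, List.take_add_one]
        simp [List.getElem?_eq_getElem hidx]
      rw [htake, List.foldl_append]
      simp only [List.foldl_cons, List.foldl_nil]
      congr 1
      have h1 : PySem.List.pyGetD hist ((m : Int)) ((0 : Int), (0 : Int)) = hist[m]'(by omega) := by
        simp [PySem.List.pyGetD_natCast, List.getElem?_eq_getElem (show m < hist.length by omega)]
      have h2 : PySem.List.pyGetD hist ((m : Int) - 1) ((0 : Int), (0 : Int)) = hist[m-1]'(by omega) := by
        have hcast : (m : Int) - 1 = ((m - 1 : Nat) : Int) := by omega
        rw [hcast]
        simp [PySem.List.pyGetD_natCast, List.getElem?_eq_getElem (show m - 1 < hist.length by omega)]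
      rw [h1, h2]
      have hidx2 : 1 + (m - 1) = m := by omega
      simp only [pvDxs, List.getElem_map, List.getElem_zip, List.getElem_drop, hidx2]

-- the core invariant: A's running state vs. negative-product pairs of the significant steps
theorem pv_core (l : List Int) (rev prev : Int) (hprev : prev = 0 ∨ 3 < |prev|) :
    (l.foldl pvStepA (rev, prev)).1
      = rev + pvNegCount ((if prev = 0 then [] else [prev])
          ++ l.filter (fun dx => decide (|dx| > 3))) := by
  induction l generalizing rev prev with
  | nil =>
    rcases hprev with h | h
    · simp [h, pvNegCount]
    · have hne : prev ≠ 0 := by intro h0; rw [h0] at h; simp at h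
      simp [hne, pvNegCount]
  | cons dx l ih =>
    by_cases hdx : |dx| > 3
    · have hdxne : ¬ dx = 0 := by intro h; rw [h] at hdx; simp at hdx
      have hdxinv : dx = 0 ∨ 3 < |dx| := Or.inr hdx
      rcases hprev with h0 | hbig
      · subst h0
        rw [List.foldl_cons, show pvStepA (rev, 0) dx = (rev, dx) from by simp [pvStepA, hdx],
          ih rev dx hdxinv]
        simp [hdxne, hdx]
      · have hne : ¬ prev = 0 := by intro h; rw [h] at hbig; simp at hbig
        have h1 : 3 < prev ∨ prev < -3 := by rcases lt_abs.mp hbig with h | h <;> omega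
        have h2 : 3 < dx ∨ dx < -3 := by rcases lt_abs.mp hdx with h | h <;> omega
        have hps : ((dx > 3 ∧ prev < -3) ∨ (dx < -3 ∧ prev > 3)) ↔ prev * dx < 0 := by
          rw [mul_neg_iff]
          constructor
          · rintro (⟨ha, hb⟩ | ⟨ha, hb⟩)
            · right; constructor <;> omega
            · left; constructor <;> omega
          · rintro (⟨ha, hb⟩ | ⟨ha, hb⟩)
            · right; constructor <;> omega
            · left; constructor <;> omega
        rw [List.foldl_cons, show pvStepA (rev, prev) dx =
            ((if (dx > 3 ∧ prev < -3) ∨ (dx < -3 ∧ prev > 3) then rev + 1 else rev), dx) from by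
              simp [pvStepA, hdx, hne],
          ih _ _ hdxinv]
        simp only [hne, if_false, hdxne, List.filter_cons, hdx, decide_true, if_true, List.cons_append,
          List.nil_append]
        rw [show pvNegCount (prev :: dx :: l.filter (fun dx => decide (|dx| > 3)))
            = (if prev * dx < 0 then 1 else 0)
              + pvNegCount (dx :: l.filter (fun dx => decide (|dx| > 3))) from rfl]
        by_cases hC : (dx > 3 ∧ prev < -3) ∨ (dx < -3 ∧ prev > 3)
        · rw [if_pos hC, if_pos (hps.mp hC)]; omega
        · rw [if_neg hC, if_neg (fun hn => hC (hps.mpr hn))]; omega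
    · have hcond : ¬ ((dx > 3 ∧ prev < -3) ∨ (dx < -3 ∧ prev > 3)) := by
        rintro (⟨hc1, _⟩ | ⟨hc1, _⟩) <;> rcases abs_le.mp (by omega : |dx| ≤ 3) with ⟨hl, hr⟩ <;> omega
      have hstep : pvStepA (rev, prev) dx = (rev, prev) := by
        simp [pvStepA, hdx, hcond]
      simp only [List.foldl_cons, hstep, List.filter_cons, hdx, decide_false]
      simp only [Bool.false_eq_true, if_false]
      exact ih rev prev hprev

-- B's zip-filter count equals pvNegCount
theorem pv_count_eq_neg (s : List Int) :
    (((s.zip (s.drop 1)).filter (fun q => decide (q.1 * q.2 < 0))).length : Int) = pvNegCount s := by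
  induction s with
  | nil => simp [pvNegCount]
  | cons a r ih =>
    cases r with
    | nil => simp [pvNegCount]
    | cons b r' =>
      simp only [List.drop_succ_cons, List.drop_zero, List.zip_cons_cons, List.filter_cons] at *
      by_cases h : a * b < 0
      · simp [pvNegCount, h] at *
        omega
      · simp [pvNegCount, h] at *
        omega

-- ===== VERDICT (by name: the statement is the Claim_ definition above) =====
theorem check_pacing_py_spec : Claim_equal_check_pacing_py := by
  intro t _ hpre
  unfold Spec_check_pacing_py check_pacing_py check_pacing_py_alt
  cases hget : (PySem.Dict.mk t).get? "position_history" with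
  | none => exact absurd hpre (by unfold Pre_check_pacing_py; rw [hget]; simp)
  | some hist =>
    simp only []
    by_cases hlen : hist.length < 10
    · simp [hlen]
    · simp only [hlen, if_false]
      have hA := pv_bridge hist pvStepA ((0 : Int), (0 : Int)) hist.length le_rfl
      simp only [pvStepA] at hA
      rw [hA]
      have hlen' : (pvDxs hist).length = hist.length - 1 := by
        simp [pvDxs, List.length_zip]
      have htake : (pvDxs hist).take (hist.length - 1) = pvDxs hist := by
        rw [List.take_of_length_le (by omega)]
      rw [htake]
      have hcore := pv_core (pvDxs hist) 0 0 (Or.inl rfl)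
      have hfst : ((pvDxs hist).foldl pvStepA ((0:Int), (0:Int))).1
          = pvNegCount ((pvDxs hist).filter (fun dx => decide (|dx| > 3))) := by
        simpa using hcore
      rw [hfst]
      have hsig : ((hist.zip (hist.drop 1)).filter
            (fun p => decide (|p.2.1 - p.1.1| > 3))).map (fun p => p.2.1 - p.1.1)
          = (pvDxs hist).filter (fun dx => decide (|dx| > 3)) := by
        simp [pvDxs, List.filter_map, Function.comp_def]
      rw [hsig]
      rw [← pv_count_eq_neg ((pvDxs hist).filter (fun dx => decide (|dx| > 3)))]
      simp only [decide_eq_decide]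
      omega
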